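-- pv_equiv track=rewrite | github.com/admk/sembr | sembr/process.py | _generate_lines
-- ===== SOURCE A (Python) =====
-- def _generate_lines(words, modes, indents):
--     lbs = [
--         (o, m) for o, m in enumerate(modes)
--         if m in ('space', 'nospace', 'break')]
--     if not lbs or lbs[-1][0] < len(words):
--         lbs.append((len(words), 'space'))
--     lines, line_indents  = [], []
--     pos = in_comment = 0
--     for o, m in lbs:
--         line = ''.join(words[pos:o]).strip()
--         if line.startswith('%'):
--             in_comment = 1
--         if m == 'nospace':
--             line = f'{line}%'
--         if m in ('space', 'break'):
--             if in_comment > 1: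
--                 line = f'% {line}'
--             if in_comment:
--                 in_comment += 1
--             if m == 'break':
--                 in_comment = 0
--         lines.append(line)
--         line_indents.append(indents[pos:o])
--         pos = o
--     # line_indents = [Counter(l).most_common(1)[0][0] for l in line_indents]
--     line_indents = [l[0] for l in line_indents]
--     return lines, line_indents
-- ===== SOURCE B (Python) =====
-- def _generate_lines(words, modes, indents):
--     # Single streaming pass: walk the modes once, growing word/indent buffers,
--     # and flush a line whenever a linebreak mode is met (no breakpoint list,
--     # no slicing).  A trailing 'space' flush plays the role of A's sentinel.
--     lines, firsts = [], []
--     buf, ibuf = [], []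
--     in_comment = 0
--     last_cut = None
--
--     def flush(m):
--         nonlocal in_comment, buf, ibuf
--         line = ''.join(buf).strip()
--         if line.startswith('%'):
--             in_comment = 1
--         if m == 'nospace':
--             line = line + '%'
--         else:
--             if in_comment > 1:
--                 line = '% ' + line
--             if in_comment:
--                 in_comment += 1
--             if m == 'break':
--                 in_comment = 0
--         lines.append(line)
--         firsts.append(ibuf[0])
--         buf, ibuf = [], []
--
--     for i, m in enumerate(modes):
--         if m in ('space', 'nospace', 'break'):
--             flush(m)
--             last_cut = i
--         if i < len(words):
--             buf.append(words[i])
--         if i < len(indents):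
--             ibuf.append(indents[i])
--     if last_cut is None or last_cut < len(words):
--         buf.extend(words[len(modes):])
--         ibuf.extend(indents[len(modes):])
--         flush('space')
--     return lines, firsts
-- ===== Notes on version B (the rewrite author's own statement) =====
-- stated objective: alternative
-- what changed: A first materialises the list of breakpoints (enumerate+filter, plus a sentinel append), then loops over it taking words[pos:o]/indents[pos:o] slices and maps l[0] over the collected indent slices at the end; B is a single streaming pass over the modes that grows word/indent buffers element by element, flushes a finished line in place whenever a linebreak mode is met (recording its first indent immediately), and emits the sentinel line as a final conditional flush - no breakpoint list, no slicing, no post-pass.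
import Mathlib
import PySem

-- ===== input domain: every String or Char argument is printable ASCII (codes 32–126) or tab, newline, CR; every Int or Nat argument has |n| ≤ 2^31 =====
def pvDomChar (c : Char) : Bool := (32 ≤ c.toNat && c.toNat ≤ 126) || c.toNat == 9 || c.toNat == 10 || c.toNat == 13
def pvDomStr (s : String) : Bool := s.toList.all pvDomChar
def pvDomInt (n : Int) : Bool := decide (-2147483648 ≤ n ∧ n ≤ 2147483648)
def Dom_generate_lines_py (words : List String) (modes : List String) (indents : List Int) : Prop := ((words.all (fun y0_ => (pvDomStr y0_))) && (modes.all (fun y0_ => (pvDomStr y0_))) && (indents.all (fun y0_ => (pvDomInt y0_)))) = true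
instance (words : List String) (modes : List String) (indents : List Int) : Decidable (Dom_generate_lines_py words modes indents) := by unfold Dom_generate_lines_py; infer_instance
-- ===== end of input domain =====

-- B replaces A's precomputed breakpoint list + slicing loop + indent post-pass by one
-- streaming pass over the modes with incremental word/indent buffers; same cost, no speed claim.
-- ===== PORT A =====
-- the body of A's for-loop over lbs (state: lines, line_indents, pos, in_comment)
def stepA (words : List String) (indents : List Int)
    (st : List String × List (List Int) × Int × Int) (om : Int × String) :
    List String × List (List Int) × Int × Int :=
  match st, om with
  | (lines, lins, pos, inc), (o, m) =>
    let line := PySem.Str.strip (PySem.Str.join "" (PySem.List.slice words (some pos) (some o)))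
    let inc := if PySem.Str.startswith line "%" then 1 else inc
    let line := if m == "nospace" then line ++ "%" else line
    let li :=
      if m == "space" || m == "break" then
        let line := if inc > 1 then "% " ++ line else line
        let inc := if inc ≠ 0 then inc + 1 else inc
        let inc := if m == "break" then 0 else inc
        (line, inc)
      else (line, inc)
    (lines ++ [li.1], lins ++ [PySem.List.slice indents (some pos) (some o)], o, li.2)

def generate_lines_py (words : List String) (modes : List String) (indents : List Int) : List String × List Int :=
  let lbs := (PySem.List.enumerate modes 0).filter
      (fun om => om.2 == "space" || om.2 == "nospace" || om.2 == "break")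
  let lbs := if lbs = [] ∨ (PySem.List.pyGetD lbs (-1) (0, "")).1 < (words.length : Int)
      then lbs ++ [((words.length : Int), "space")] else lbs
  let st := lbs.foldl (stepA words indents) ([], [], 0, 0)
  (st.1, st.2.1.map (fun l => PySem.List.pyGetD l 0 0))

-- ===== PORT B =====
-- Python B's inner 'flush': finish the buffered line; pyGetD default 0 stands where
-- Python's ibuf[0] raises on an empty buffer (those inputs are outside Pre_).
-- Buffer clearing is done at the call sites.
def bFlush (lines : List String) (firsts : List Int) (buf : List String)
    (ibuf : List Int) (inc : Int) (m : String) : List String × List Int × Int :=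
  let line := PySem.Str.strip (PySem.Str.join "" buf)
  let inc := if PySem.Str.startswith line "%" then 1 else inc
  if m == "nospace" then
    (lines ++ [line ++ "%"], firsts ++ [PySem.List.pyGetD ibuf 0 0], inc)
  else
    let line := if inc > 1 then "% " ++ line else line
    let inc := if inc ≠ 0 then inc + 1 else inc
    let inc := if m == "break" then 0 else inc
    (lines ++ [line], firsts ++ [PySem.List.pyGetD ibuf 0 0], inc)

-- Python B's loop body over enumerate(modes): flush at a linebreak mode, then grow the buffers
def bStep (words : List String) (indents : List Int)
    (st : List String × List Int × List String × List Int × Int × Option Int)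
    (im : Int × String) :
    List String × List Int × List String × List Int × Int × Option Int :=
  match st, im with
  | (lines, firsts, buf, ibuf, inc, lc), (i, m) =>
    let s :=
      if m == "space" || m == "nospace" || m == "break" then
        let f := bFlush lines firsts buf ibuf inc m
        (f.1, f.2.1, ([] : List String), ([] : List Int), f.2.2, some i)
      else (lines, firsts, buf, ibuf, inc, lc)
    match s with
    | (lines, firsts, buf, ibuf, inc, lc) =>
      (lines, firsts,
       if i < (words.length : Int) then buf ++ [PySem.List.pyGetD words i ""] else buf,
       if i < (indents.length : Int) then ibuf ++ [PySem.List.pyGetD indents i 0] else ibuf,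
       inc, lc)

def generate_lines_py_alt (words : List String) (modes : List String) (indents : List Int) : List String × List Int :=
  match (PySem.List.enumerate modes 0).foldl (bStep words indents) ([], [], [], [], 0, none) with
  | (lines, firsts, buf, ibuf, inc, lc) =>
    let doSent := match lc with | none => true | some c => decide (c < (words.length : Int))
    if doSent then
      let buf := buf ++ PySem.List.slice words (some (modes.length : Int)) none
      let ibuf := ibuf ++ PySem.List.slice indents (some (modes.length : Int)) none
      let f := bFlush lines firsts buf ibuf inc "space"
      (f.1, f.2.1)
    else (lines, firsts)

-- ===== PRECONDITION & SPEC =====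
-- the final breakpoint list (positions of 'space'/'nospace'/'break' modes, plus the
-- end-of-words sentinel Python appends)
def pvCuts (words : List String) (modes : List String) : List Int :=
  let c := ((PySem.List.enumerate modes 0).filter
      (fun om => om.2 == "space" || om.2 == "nospace" || om.2 == "break")).map (·.1)
  if c = [] ∨ PySem.List.pyGetD c (-1) (-1) < (words.length : Int)
  then c ++ [(words.length : Int)] else c

-- Pre_ excludes exactly the inputs on which A raises IndexError at 'l[0]': a line
-- segment that is empty or starts at or beyond len(indents).
def Pre_generate_lines_py (words : List String) (modes : List String) (indents : List Int) : Prop :=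
  ∀ ab ∈ (0 :: (pvCuts words modes).dropLast).zip (pvCuts words modes),
    ab.1 < ab.2 ∧ ab.1 < (indents.length : Int)
instance (words : List String) (modes : List String) (indents : List Int) : Decidable (Pre_generate_lines_py words modes indents) := by unfold Pre_generate_lines_py; infer_instance

def pvWitness_generate_lines_py : List String × List String × List Int := (["%ab", "cd"], ["off", "space"], [7, 3])

def Spec_generate_lines_py (words : List String) (modes : List String) (indents : List Int) (out : List String × List Int) : Prop := out = generate_lines_py_alt words modes indents
instance (words : List String) (modes : List String) (indents : List Int) (out : List String × List Int) : Decidable (Spec_generate_lines_py words modes indents out) := by unfold Spec_generate_lines_py; infer_instance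

-- ===== CLAIM (what is proved, stated in full; the proofs are below) =====
def Claim_equal_generate_lines_py : Prop := ∀ (words : List String) (modes : List String) (indents : List Int), Dom_generate_lines_py words modes indents → Pre_generate_lines_py words modes indents → Spec_generate_lines_py words modes indents (generate_lines_py words modes indents)

-- ===== LEMMAS AND PROOFS =====

-- first element with default, as A's post-pass applies it
def pvG (l : List Int) : Int := PySem.List.pyGetD l 0 0

-- a linebreak mode
def pvBrk (om : Int × String) : Bool := om.2 == "space" || om.2 == "nospace" || om.2 == "break"

-- A's loop over the breakpoints of mode list ms enumerated from k
def pvA (words : List String) (indents : List Int) (ms : List String) (k : Int)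
    (lines : List String) (lins : List (List Int)) (pos inc : Int) :
    List String × List (List Int) × Int × Int :=
  ((PySem.List.enumerate ms k).filter pvBrk).foldl (stepA words indents) (lines, lins, pos, inc)

-- an empty slice
lemma slice_nil {α : Type} (xs : List α) (k : Int) (hk : 0 ≤ k) :
    PySem.List.slice xs (some k) (some k) = [] := by
  rw [PySem.List.slice_toNat xs hk hk]; simp

-- growing a buffer by one element is extending the slice by one
lemma slice_snoc {α : Type} (xs : List α) (pos k : Int) (d : α)
    (h0 : 0 ≤ pos) (hpk : pos ≤ k) :
    (if k < (xs.length : Int) then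
        PySem.List.slice xs (some pos) (some k) ++ [PySem.List.pyGetD xs k d]
      else PySem.List.slice xs (some pos) (some k))
      = PySem.List.slice xs (some pos) (some (k + 1)) := by
  have hk : (0:Int) ≤ k := le_trans h0 hpk
  rw [PySem.List.slice_toNat xs h0 hk, PySem.List.slice_toNat xs h0 (by omega)]
  have hk1 : (k + 1).toNat = k.toNat + 1 := by omega
  by_cases h : k < (xs.length : Int)
  · rw [if_pos h]
    have hlt : k.toNat < xs.length := by omega
    rw [PySem.List.pyGetD_eq_getElem xs d hk h]
    rw [hk1, show k.toNat + 1 - pos.toNat = (k.toNat - pos.toNat) + 1 by omega,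
        List.take_add_one, List.getElem?_drop,
        show pos.toNat + (k.toNat - pos.toNat) = k.toNat by omega,
        List.getElem?_eq_getElem hlt]
    simp
  · rw [if_neg h]
    rw [List.take_of_length_le (by rw [List.length_drop]; omega),
        List.take_of_length_le (by rw [List.length_drop]; omega)]

-- xs[a:] is drop
lemma slice_none_drop {α : Type} (xs : List α) (a : Int) (h0 : 0 ≤ a) :
    PySem.List.slice xs (some a) none = xs.drop a.toNat := by
  show List.take _ (List.drop _ xs) = _
  simp only [PySem.List.clampIdx, if_neg (by omega : ¬ a < 0)]
  by_cases h : a.toNat ≤ xs.length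
  · rw [min_eq_left h]
    exact List.take_of_length_le (by rw [List.length_drop])
  · rw [min_eq_right (by omega)]
    rw [List.drop_of_length_le (le_refl _), List.drop_of_length_le (by omega), List.take_nil]

-- xs[pos:k] ++ xs[k:] = xs[pos:]
lemma slice_cat {α : Type} (xs : List α) (pos k : Int) (h0 : 0 ≤ pos) (hpk : pos ≤ k) :
    PySem.List.slice xs (some pos) (some k) ++ xs.drop k.toNat = xs.drop pos.toNat := by
  rw [PySem.List.slice_toNat xs h0 (le_trans h0 hpk)]
  have hdd : xs.drop k.toNat = (xs.drop pos.toNat).drop (k.toNat - pos.toNat) := by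
    rw [List.drop_drop]; congr 1; omega
  rw [hdd]
  exact List.take_append_drop _ _

-- xs[pos:len(xs)] is drop
lemma slice_full {α : Type} (xs : List α) (pos : Int) (h0 : 0 ≤ pos) :
    PySem.List.slice xs (some pos) (some (xs.length : Int)) = xs.drop pos.toNat := by
  rw [PySem.List.slice_toNat xs h0 (by positivity), Int.toNat_natCast]
  exact List.take_of_length_le (by rw [List.length_drop])

-- the first element of indents[a:b] is indents[a] on a nonempty in-range segment
lemma first_slice (indents : List Int) (a b : Int) (h0 : 0 ≤ a) (hab : a < b)
    (hlen : a < (indents.length : Int)) :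
    PySem.List.pyGetD (PySem.List.slice indents (some a) (some b)) 0 0
      = PySem.List.pyGetD indents a 0 := by
  rw [PySem.List.slice_toNat, PySem.List.pyGetD_zero, PySem.List.pyGetD_eq_getElem]
  · rw [List.getD_eq_getElem?_getD, List.getElem?_take_of_lt (by omega), List.getElem?_drop]
    have h1 : a.toNat < indents.length := by omega
    simp [List.getElem?_eq_getElem h1]
  · exact h0
  · exact hlen
  · exact h0
  · omega

-- the first element of xs[a:] is xs[a] when in range
lemma first_drop (xs : List Int) (a : Int) (h0 : 0 ≤ a) (hlen : a < (xs.length : Int)) :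
    PySem.List.pyGetD (xs.drop a.toNat) 0 0 = PySem.List.pyGetD xs a 0 := by
  rw [PySem.List.pyGetD_zero, PySem.List.pyGetD_eq_getElem xs 0 h0 hlen]
  rw [List.getD_eq_getElem?_getD, List.getElem?_drop, Nat.add_zero]
  have h1 : a.toNat < xs.length := by omega
  simp [List.getElem?_eq_getElem h1]

-- B's flush equals one step of A's loop, componentwise, when the buffers hold the
-- current segment's slices and the mode is a linebreak mode
lemma flush_eq (words : List String) (indents : List Int) (lines : List String)
    (lins : List (List Int)) (pos o inc : Int) (m : String)
    (hm : m = "space" ∨ m = "nospace" ∨ m = "break") :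
    bFlush lines (lins.map pvG) (PySem.List.slice words (some pos) (some o))
        (PySem.List.slice indents (some pos) (some o)) inc m
      = ((stepA words indents (lines, lins, pos, inc) (o, m)).1,
         ((stepA words indents (lines, lins, pos, inc) (o, m)).2.1).map pvG,
         (stepA words indents (lines, lins, pos, inc) (o, m)).2.2.2) := by
  rcases hm with h | h | h <;> subst h <;> simp [bFlush, stepA, pvG]

-- A's loop step records the cut as the new position
lemma stepA_pos (words : List String) (indents : List Int)
    (st : List String × List (List Int) × Int × Int) (om : Int × String) :
    (stepA words indents st om).2.2.1 = om.1 := by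
  obtain ⟨lines, lins, pos, inc⟩ := st; obtain ⟨o, m⟩ := om; simp [stepA]

-- after A's loop the position is the last cut
lemma foldA_last (words : List String) (indents : List Int) :
    ∀ (L : List (Int × String)) (lines : List String) (lins : List (List Int))
      (pos inc : Int) (h : L ≠ []),
    (L.foldl (stepA words indents) (lines, lins, pos, inc)).2.2.1 = (L.getLast h).1 := by
  intro L
  induction L with
  | nil => intro _ _ _ _ h; exact absurd rfl h
  | cons hd tl ih =>
    intro lines lins pos inc h
    cases tl with
    | nil => simp [stepA_pos]
    | cons b tl2 =>
      have hne : (b :: tl2) ≠ [] := by simp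
      rw [List.foldl_cons]
      rcases hs : stepA words indents (lines, lins, pos, inc) hd with ⟨l1, l2, p, j⟩
      rw [ih l1 l2 p j hne, List.getLast_cons hne]

-- the streaming invariant: B's fold over enumerate(ms, k), started with buffers holding
-- words[pos:k] / indents[pos:k], equals A's fold over the filtered breakpoints
lemma bFold_eq (words : List String) (indents : List Int) :
    ∀ (ms : List String) (k : Int) (lines : List String) (lins : List (List Int))
      (pos inc : Int) (lc : Option Int), 0 ≤ pos → pos ≤ k →
    ((PySem.List.enumerate ms k).foldl (bStep words indents)
        (lines, lins.map pvG, PySem.List.slice words (some pos) (some k),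
         PySem.List.slice indents (some pos) (some k), inc, lc)
      = ((pvA words indents ms k lines lins pos inc).1,
         (pvA words indents ms k lines lins pos inc).2.1.map pvG,
         PySem.List.slice words (some (pvA words indents ms k lines lins pos inc).2.2.1)
           (some (k + ms.length)),
         PySem.List.slice indents (some (pvA words indents ms k lines lins pos inc).2.2.1)
           (some (k + ms.length)),
         (pvA words indents ms k lines lins pos inc).2.2.2,
         if ((PySem.List.enumerate ms k).filter pvBrk).isEmpty then lc
         else some (pvA words indents ms k lines lins pos inc).2.2.1))
      ∧ 0 ≤ (pvA words indents ms k lines lins pos inc).2.2.1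
      ∧ (pvA words indents ms k lines lins pos inc).2.2.1 ≤ k + ms.length := by
  intro ms
  induction ms with
  | nil =>
    intro k lines lins pos inc lc h0 hpk
    refine ⟨?_, h0, by simpa using hpk⟩
    simp [pvA, PySem.List.enumerate]
  | cons m tl ih =>
    intro k lines lins pos inc lc h0 hpk
    have hk0 : (0:Int) ≤ k := le_trans h0 hpk
    have hEnum : PySem.List.enumerate (m :: tl) k = (k, m) :: PySem.List.enumerate tl (k + 1) := by
      simp [PySem.List.enumerate]
    have harith : k + ((m :: tl).length : Int) = k + 1 + (tl.length : Int) := by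
      push_cast [List.length_cons]; ring
    by_cases hb : pvBrk (k, m)
    · have hbB : (m == "space" || m == "nospace" || m == "break") = true := by
        simpa [pvBrk] using hb
      have hm : m = "space" ∨ m = "nospace" ∨ m = "break" := by
        have h' := hbB; simp at h'; tauto
      have hbw : (if k < (words.length : Int)
            then [PySem.List.pyGetD words k ""] else ([] : List String))
          = PySem.List.slice words (some k) (some (k + 1)) := by
        rw [← slice_snoc words k k "" hk0 le_rfl, slice_nil words k hk0]
        simp
      have hbi : (if k < (indents.length : Int)
            then [PySem.List.pyGetD indents k 0] else ([] : List Int))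
          = PySem.List.slice indents (some k) (some (k + 1)) := by
        rw [← slice_snoc indents k k 0 hk0 le_rfl, slice_nil indents k hk0]
        simp
      have hstep : bStep words indents
          (lines, lins.map pvG, PySem.List.slice words (some pos) (some k),
           PySem.List.slice indents (some pos) (some k), inc, lc) (k, m)
          = ((stepA words indents (lines, lins, pos, inc) (k, m)).1,
             (stepA words indents (lines, lins, pos, inc) (k, m)).2.1.map pvG,
             PySem.List.slice words (some k) (some (k + 1)),
             PySem.List.slice indents (some k) (some (k + 1)),
             (stepA words indents (lines, lins, pos, inc) (k, m)).2.2.2, some k) := by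
        simp only [bStep, hbB, if_true]
        rw [flush_eq words indents lines lins pos k inc m hm]
        rw [← hbw, ← hbi]
        simp
      rw [hEnum, List.foldl_cons, hstep]
      obtain ⟨ih1, ih2, ih3⟩ := ih (k + 1)
        (stepA words indents (lines, lins, pos, inc) (k, m)).1
        (stepA words indents (lines, lins, pos, inc) (k, m)).2.1
        k (stepA words indents (lines, lins, pos, inc) (k, m)).2.2.2 (some k) hk0 (by omega)
      rw [ih1]
      have hfilter : (PySem.List.enumerate (m :: tl) k).filter pvBrk
          = (k, m) :: (PySem.List.enumerate tl (k + 1)).filter pvBrk := by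
        rw [hEnum, List.filter_cons, if_pos hb]
      have hpvA : pvA words indents (m :: tl) k lines lins pos inc
          = pvA words indents tl (k + 1)
              (stepA words indents (lines, lins, pos, inc) (k, m)).1
              (stepA words indents (lines, lins, pos, inc) (k, m)).2.1
              k (stepA words indents (lines, lins, pos, inc) (k, m)).2.2.2 := by
        unfold pvA
        rw [hfilter, List.foldl_cons]
        congr 1
      refine ⟨?_, by rw [hpvA]; exact ih2, by rw [hpvA, harith]; exact ih3⟩
      rw [hpvA, harith, List.filter_cons, if_pos hb]
      by_cases hE : (PySem.List.enumerate tl (k + 1)).filter pvBrk = []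
      · simp [hE, pvA]
      · simp [hE, List.isEmpty_iff]
    · have hbB : (m == "space" || m == "nospace" || m == "break") = false := by
        simpa [pvBrk] using hb
      have hstep : bStep words indents
          (lines, lins.map pvG, PySem.List.slice words (some pos) (some k),
           PySem.List.slice indents (some pos) (some k), inc, lc) (k, m)
          = (lines, lins.map pvG, PySem.List.slice words (some pos) (some (k + 1)),
             PySem.List.slice indents (some pos) (some (k + 1)), inc, lc) := by
        simp only [bStep, hbB, Bool.false_eq_true, if_false]
        rw [← slice_snoc words pos k "" h0 hpk, ← slice_snoc indents pos k 0 h0 hpk]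
      rw [hEnum, List.foldl_cons, hstep]
      obtain ⟨ih1, ih2, ih3⟩ := ih (k + 1) lines lins pos inc lc h0 (by omega)
      rw [ih1]
      have hfilter : (PySem.List.enumerate (m :: tl) k).filter pvBrk
          = (PySem.List.enumerate tl (k + 1)).filter pvBrk := by
        rw [hEnum, List.filter_cons, if_neg (by simpa using hb)]
      have hpvA : pvA words indents (m :: tl) k lines lins pos inc
          = pvA words indents tl (k + 1) lines lins pos inc := by
        unfold pvA; rw [hfilter]
      rw [hpvA, harith, List.filter_cons, if_neg (show ¬(pvBrk (k, m) = true) by simp [hb])]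
      exact ⟨rfl, ih2, ih3⟩

-- taking a nonempty prefix keeps the first element
lemma first_take (xs : List Int) (n : Nat) (hn : 0 < n) :
    PySem.List.pyGetD (xs.take n) 0 0 = PySem.List.pyGetD xs 0 0 := by
  rw [PySem.List.pyGetD_zero, PySem.List.pyGetD_zero]
  cases xs with
  | nil => simp
  | cons a t =>
    obtain ⟨m, rfl⟩ : ∃ m, n = m + 1 := ⟨n - 1, by omega⟩
    simp

-- the last pair of the segment zip
lemma lastPair_mem (C : List Int) (h c : Int) :
    (C.getLastD h, c) ∈ ((h :: (C ++ [c]).dropLast).zip (C ++ [c])) := by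
  induction C generalizing h with
  | nil => simp
  | cons a t ih =>
    have hne : t ++ [c] ≠ [] := by simp
    rw [List.cons_append, List.dropLast_cons_of_ne_nil hne, List.getLastD_cons,
        List.zip_cons_cons]
    exact List.mem_cons_of_mem _ (ih a)

-- ===== VERDICT (by name: the statement is the Claim_ definition above) =====
theorem generate_lines_py_spec : Claim_equal_generate_lines_py := by
  intro words modes indents _ hpre
  unfold Spec_generate_lines_py
  have hfun : (fun om : Int × String =>
      om.2 == "space" || om.2 == "nospace" || om.2 == "break") = pvBrk := rfl
  have hpg : (fun l : List Int => PySem.List.pyGetD l 0 0) = pvG := rfl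
  have hM0 : (0:Int) ≤ (modes.length : Int) := by positivity
  obtain ⟨hfold, hpos0, hposM⟩ := bFold_eq words indents modes 0 [] [] 0 0 none le_rfl le_rfl
  rw [slice_nil words 0 le_rfl, slice_nil indents 0 le_rfl, List.map_nil, zero_add] at hfold
  by_cases he : (PySem.List.enumerate modes 0).filter pvBrk = []
  · -- no explicit breakpoint: only the sentinel line
    have hAe : pvA words indents modes 0 [] [] 0 0 = ([], [], 0, 0) := by
      unfold pvA; rw [he]; rfl
    have hie : ((PySem.List.enumerate modes 0).filter pvBrk).isEmpty = true := by
      rw [he]; rfl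
    have hpvc : pvCuts words modes = [(words.length : Int)] := by
      simp [pvCuts, hfun, he]
    obtain ⟨h0w, h0i⟩ := hpre (0, (words.length : Int)) (by rw [hpvc]; simp)
    have hti := first_take indents words.length (by simp only [] at h0w; exact_mod_cast h0w)
    simp only [generate_lines_py, generate_lines_py_alt, hfun, hpg, hfold, hAe, he,
      true_or, if_true, List.map_nil, List.nil_append,
      List.foldl_cons, List.foldl_nil]
    rw [slice_none_drop words (modes.length : Int) hM0,
        slice_none_drop indents (modes.length : Int) hM0,
        slice_cat words 0 (modes.length : Int) le_rfl hM0,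
        slice_cat indents 0 (modes.length : Int) le_rfl hM0]
    simp only [Int.toNat_zero, List.drop_zero]
    simp [stepA, bFlush, hti, pvG]
  · -- at least one breakpoint
    have hie : ((PySem.List.enumerate modes 0).filter pvBrk).isEmpty = false := by
      cases hx : ((PySem.List.enumerate modes 0).filter pvBrk).isEmpty
      · rfl
      · exact absurd (List.isEmpty_iff.mp hx) he
    have hlast : (pvA words indents modes 0 [] [] 0 0).2.2.1
        = (((PySem.List.enumerate modes 0).filter pvBrk).getLast he).1 := by
      unfold pvA; exact foldA_last words indents _ [] [] 0 0 he
    have h1 : PySem.List.pyGetD ((PySem.List.enumerate modes 0).filter pvBrk) (-1) (0, "")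
        = ((PySem.List.enumerate modes 0).filter pvBrk).getLast he := by
      simp [pysem, he]
    have hne' : ((PySem.List.enumerate modes 0).filter pvBrk).map (·.1) ≠ [] := by
      simpa using he
    have h2 : PySem.List.pyGetD (((PySem.List.enumerate modes 0).filter pvBrk).map (·.1)) (-1) (-1)
        = (((PySem.List.enumerate modes 0).filter pvBrk).getLast he).1 := by
      simp [pysem, hne']
    have hcl : (((PySem.List.enumerate modes 0).filter pvBrk).map (·.1)).getLastD 0
        = (((PySem.List.enumerate modes 0).filter pvBrk).getLast he).1 := by
      rw [List.getLastD_eq_getLast?, List.getLast?_map, List.getLast?_eq_some_getLast he]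
      rfl
    have hp0 : (0:Int) ≤ (((PySem.List.enumerate modes 0).filter pvBrk).getLast he).1 := by
      rw [← hlast]; exact hpos0
    have hpM : (((PySem.List.enumerate modes 0).filter pvBrk).getLast he).1
        ≤ (modes.length : Int) := by
      rw [← hlast]; simpa using hposM
    by_cases hw : (((PySem.List.enumerate modes 0).filter pvBrk).getLast he).1
        < (words.length : Int)
    · -- sentinel fires on both sides
      have hpvc : pvCuts words modes
          = (((PySem.List.enumerate modes 0).filter pvBrk).map (·.1))
            ++ [(words.length : Int)] := by
        simp only [pvCuts, hfun]
        rw [if_pos (Or.inr (by rw [h2]; exact hw))]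
      have hmem : ((((PySem.List.enumerate modes 0).filter pvBrk).getLast he).1,
          (words.length : Int)) ∈
            (0 :: (pvCuts words modes).dropLast).zip (pvCuts words modes) := by
        rw [hpvc, ← hcl]
        exact lastPair_mem _ 0 _
      obtain ⟨hplw, hpli⟩ := hpre _ hmem
      have hsw := slice_full words (((PySem.List.enumerate modes 0).filter pvBrk).getLast he).1 hp0
      have hgg : PySem.List.pyGetD (PySem.List.slice indents
            (some (((PySem.List.enumerate modes 0).filter pvBrk).getLast he).1)
            (some (words.length : Int))) 0 0
          = PySem.List.pyGetD (indents.drop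
              ((((PySem.List.enumerate modes 0).filter pvBrk).getLast he).1).toNat) 0 0 := by
        rw [first_slice indents _ _ hp0 hplw hpli, first_drop indents _ hp0 hpli]
      simp only [generate_lines_py, generate_lines_py_alt, hfun, hpg, hfold, hie,
        Bool.false_eq_true, if_false, hlast]
      rw [if_pos (Or.inr (by rw [h1]; exact hw))]
      rw [List.foldl_append, List.foldl_cons, List.foldl_nil]
      simp only [hw, decide_true, if_true]
      rw [slice_none_drop words (modes.length : Int) hM0,
          slice_none_drop indents (modes.length : Int) hM0,
          slice_cat words _ (modes.length : Int) hp0 hpM,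
          slice_cat indents _ (modes.length : Int) hp0 hpM]
      rw [show List.foldl (stepA words indents) ([], [], 0, 0)
            ((PySem.List.enumerate modes 0).filter pvBrk)
          = pvA words indents modes 0 [] [] 0 0 from rfl]
      simp only [stepA, bFlush, hlast]
      generalize hgen : (((PySem.List.enumerate modes 0).filter pvBrk).getLast he).1 = p
      rw [hgen] at hsw hgg
      rw [hsw]
      simp [hgg, pvG]
    · -- no sentinel on either side
      simp only [generate_lines_py, generate_lines_py_alt, hfun, hpg, hfold, hie,
        Bool.false_eq_true, if_false, hlast]
      rw [if_neg (by
        intro hh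
        rcases hh with hh | hh
        · exact he hh
        · rw [h1] at hh; omega)]
      rw [decide_eq_false hw]
      simp only [Bool.false_eq_true, if_false]
      rfl
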